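-- pv_equiv track=rewrite | github.com/UsmanA4/PGR107-Python-Programming | Exam 2023/Python Exam 2023/Question4.py | shared_characters
-- ===== SOURCE A (Python) =====
-- def shared_characters(string1, string2):
--     string1 = string1.lower() # If the user print a uppercase letters so this function will convert it to lower case
--     string2 = string2.lower()
--
--     shared = ""
--     for char in string1:
--         if char in string2 and char not in shared:
--             shared += char
--
--     # convert the shared string to a list and sorting the result so that the letters are in order
--     # and join it back into a string
--     theList = list(shared)
--     theList.sort()
--     sortList = " , " .join(theList)
--     return sortList
-- ===== SOURCE B (Python) =====
-- def shared_characters(string1, string2):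
--     # Bitmap over the ASCII table: mark which codes occur in each lowercased
--     # string, then scan codes 0..127 in increasing order -- already sorted, no
--     # sort and no membership scans needed.
--     present1 = [False] * 128
--     for ch in string1.lower():
--         present1[ord(ch)] = True
--     present2 = [False] * 128
--     for ch in string2.lower():
--         present2[ord(ch)] = True
--     return " , ".join(chr(i) for i in range(128) if present1[i] and present2[i])
-- ===== Notes on version B (the rewrite author's own statement) =====
-- stated objective: alternative
-- what changed: Replaces A's per-character membership scans plus final sort by a bitmap intersection: one pass marks each string's characters in a 128-entry boolean table, then a single in-order scan of the ASCII codes emits the shared characters already sorted, with no sort and no inner scans.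
import Mathlib
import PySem

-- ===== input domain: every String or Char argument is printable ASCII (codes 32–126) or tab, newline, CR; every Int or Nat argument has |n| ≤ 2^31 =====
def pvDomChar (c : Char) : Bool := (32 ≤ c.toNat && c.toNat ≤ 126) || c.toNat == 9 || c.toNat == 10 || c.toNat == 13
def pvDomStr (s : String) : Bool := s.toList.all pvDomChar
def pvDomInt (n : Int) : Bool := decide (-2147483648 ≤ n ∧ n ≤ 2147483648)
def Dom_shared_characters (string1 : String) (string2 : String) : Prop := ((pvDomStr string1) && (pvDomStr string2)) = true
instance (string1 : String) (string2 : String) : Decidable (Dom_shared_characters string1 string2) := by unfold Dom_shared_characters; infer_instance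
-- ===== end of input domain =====

-- B replaces A's per-character membership scans + final sort with a 128-entry bitmap
-- intersection scanned in code order (already sorted): a different algorithm of similar cost.


-- ===== PORT A =====
def shared_characters (string1 : String) (string2 : String) : String :=
  let s1 := PySem.Chars.lower string1.toList
  let s2 := PySem.Chars.lower string2.toList
  let shared := s1.foldl (fun acc c => if c ∈ s2 ∧ c ∉ acc then acc ++ [c] else acc) []
  let theList := PySem.List.sorted shared (fun x => x) false
  PySem.Str.join " , " (theList.map (fun c => String.ofList [c]))

-- ===== PORT B =====
-- one pass: mark each character's code in a 128-entry boolean table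
def pvMarkTable (cs : List Char) : List Bool :=
  cs.foldl (fun t c => t.set c.toNat true) (List.replicate 128 false)

def shared_characters_alt (string1 : String) (string2 : String) : String :=
  let present1 := pvMarkTable (PySem.Chars.lower string1.toList)
  let present2 := pvMarkTable (PySem.Chars.lower string2.toList)
  let res := (List.range 128).filterMap (fun i =>
      if present1.getD i false && present2.getD i false then some (Char.ofNat i) else none)
  PySem.Str.join " , " (res.map (fun c => String.ofList [c]))

-- ===== PRECONDITION & SPEC =====
def Spec_shared_characters (string1 : String) (string2 : String) (out : String) : Prop := out = shared_characters_alt string1 string2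
instance (string1 : String) (string2 : String) (out : String) : Decidable (Spec_shared_characters string1 string2 out) := by unfold Spec_shared_characters; infer_instance

-- ===== CLAIM (what is proved, stated in full; the proofs are below) =====
def Claim_equal_shared_characters : Prop := ∀ (string1 : String) (string2 : String), Dom_shared_characters string1 string2 → Spec_shared_characters string1 string2 (shared_characters string1 string2)

-- ===== LEMMAS AND PROOFS =====

-- Membership in A's accumulator loop: collected chars are acc's plus those in both inputs.
theorem pv_mem_foldl (s2 l : List Char) (acc : List Char) (c : Char) :
    c ∈ l.foldl (fun acc c => if c ∈ s2 ∧ c ∉ acc then acc ++ [c] else acc) acc ↔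
      c ∈ acc ∨ (c ∈ l ∧ c ∈ s2) := by
  induction l generalizing acc with
  | nil => simp
  | cons x l ih =>
    simp only [List.foldl_cons, ih]
    by_cases hx : x ∈ s2 ∧ x ∉ acc
    · simp only [if_pos hx, List.mem_append, List.mem_cons, List.not_mem_nil, or_false]
      obtain ⟨hxs, hxa⟩ := hx
      constructor
      · rintro ((h | rfl) | h)
        · exact Or.inl h
        · exact Or.inr ⟨Or.inl rfl, hxs⟩
        · exact Or.inr ⟨Or.inr h.1, h.2⟩
      · rintro (h | ⟨(rfl | h), hs⟩)
        · exact Or.inl (Or.inl h)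
        · exact Or.inl (Or.inr rfl)
        · exact Or.inr ⟨h, hs⟩
    · simp only [if_neg hx, List.mem_cons]
      constructor
      · rintro (h | h)
        · exact Or.inl h
        · exact Or.inr ⟨Or.inr h.1, h.2⟩
      · rintro (h | ⟨(rfl | h), hs⟩)
        · exact Or.inl h
        · cases not_and_or.mp hx with
          | inl h' => exact absurd hs h'
          | inr h' => exact Or.inl (not_not.mp h')
        · exact Or.inr ⟨h, hs⟩

-- A's accumulator loop preserves Nodup.
theorem pv_nodup_foldl (s2 l : List Char) (acc : List Char) (h : acc.Nodup) :
    (l.foldl (fun acc c => if c ∈ s2 ∧ c ∉ acc then acc ++ [c] else acc) acc).Nodup := by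
  induction l generalizing acc with
  | nil => exact h
  | cons x l ih =>
    simp only [List.foldl_cons]
    by_cases hx : x ∈ s2 ∧ x ∉ acc
    · rw [if_pos hx]
      refine ih _ ?_
      rw [List.nodup_append]
      refine ⟨h, List.nodup_singleton x, ?_⟩
      intro a ha b hb hab
      subst hab
      rw [List.mem_singleton] at hb
      subst hb
      exact hx.2 ha
    · rw [if_neg hx]; exact ih _ h

-- B's marking loop: entry i is set iff it was set before or some char has code i.
theorem pv_mark_foldl (l : List Char) (acc : List Bool) (i : Nat) (hi : i < acc.length) :
    (l.foldl (fun t c => t.set c.toNat true) acc).getD i false = true ↔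
      acc.getD i false = true ∨ ∃ c ∈ l, c.toNat = i := by
  induction l generalizing acc with
  | nil => simp
  | cons x l ih =>
    simp only [List.foldl_cons]
    rw [ih _ (by simpa using hi)]
    have hset : (acc.set x.toNat true).getD i false = true ↔
        acc.getD i false = true ∨ x.toNat = i := by
      simp only [List.getD_eq_getElem?_getD, List.getElem?_set]
      by_cases hxi : x.toNat = i
      · subst hxi; simp [hi]
      · simp [hxi]
    rw [hset]
    constructor
    · rintro ((h | h) | ⟨c, hc, rfl⟩)
      · exact Or.inl h
      · exact Or.inr ⟨x, List.mem_cons_self, h⟩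
      · exact Or.inr ⟨c, List.mem_cons_of_mem _ hc, rfl⟩
    · rintro (h | ⟨c, hc, rfl⟩)
      · exact Or.inl (Or.inl h)
      · rcases List.mem_cons.mp hc with rfl | hc
        · exact Or.inl (Or.inr rfl)
        · exact Or.inr ⟨c, hc, rfl⟩

-- The table of a char list whose codes are < 128: entry i ↔ some char has code i.
theorem pv_markTable_getD (l : List Char) (i : Nat) (hi : i < 128) :
    (pvMarkTable l).getD i false = true ↔ ∃ c ∈ l, c.toNat = i := by
  unfold pvMarkTable
  rw [pv_mark_foldl l _ i (by simpa using hi)]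
  have h0 : (List.replicate 128 false).getD i false = false := by
    rw [List.getD_eq_getElem?_getD, List.getElem?_replicate]
    simp [hi]
  rw [h0]
  simp

-- Dom: every char of the lowercased list has code < 128.
theorem pv_lower_lt_128 (s : String) (h : pvDomStr s = true) :
    ∀ c ∈ PySem.Chars.lower s.toList, c.toNat < 128 := by
  intro c hc
  simp only [PySem.Chars.lower, List.mem_map] at hc
  obtain ⟨c0, hc0, rfl⟩ := hc
  have hd : pvDomChar c0 = true := by
    simp only [pvDomStr, List.all_eq_true] at h
    exact h c0 hc0
  simp only [pvDomChar, Bool.or_eq_true, Bool.and_eq_true, decide_eq_true_eq, beq_iff_eq] at hd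
  have hlt : c0.toNat < 128 := by omega
  simp only [PySem.Chars.lowerChar]
  by_cases hu : PySem.Chars.isupper c0 = true
  · rw [if_pos hu]
    simp only [PySem.Chars.isupper, Bool.and_eq_true, decide_eq_true_eq] at hu
    have h1 : 65 ≤ c0.toNat := by
      have := hu.1; rw [Char.le_def, UInt32.le_iff_toBitVec_le, BitVec.le_def] at this
      exact this
    have h2 : c0.toNat ≤ 90 := by
      have := hu.2; rw [Char.le_def, UInt32.le_iff_toBitVec_le, BitVec.le_def] at this
      exact this
    have hv : (c0.toNat + 32).isValidChar := Or.inl (by omega)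
    rw [Char.toNat_ofNat, if_pos hv]
    omega
  · rw [if_neg hu]; exact hlt

-- Valid small codes round-trip through Char.ofNat.
theorem pv_toNat_ofNat (i : Nat) (hi : i < 128) : (Char.ofNat i).toNat = i := by
  have hv : i.isValidChar := Or.inl (by omega)
  rw [Char.toNat_ofNat, if_pos hv]

-- ===== VERDICT (by name: the statement is the Claim_ definition above) =====
theorem shared_characters_spec : Claim_equal_shared_characters := by
  intro string1 string2 hdom
  unfold Dom_shared_characters at hdom
  rw [Bool.and_eq_true] at hdom
  obtain ⟨hd1, hd2⟩ := hdom
  unfold Spec_shared_characters shared_characters shared_characters_alt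
  simp only []
  set s1 := PySem.Chars.lower string1.toList with hs1
  set s2 := PySem.Chars.lower string2.toList with hs2
  have hl1 := pv_lower_lt_128 string1 hd1
  have hl2 := pv_lower_lt_128 string2 hd2
  rw [← hs1] at hl1
  rw [← hs2] at hl2
  set shared := s1.foldl (fun acc c => if c ∈ s2 ∧ c ∉ acc then acc ++ [c] else acc) [] with hsh
  set res := (List.range 128).filterMap (fun i =>
      if (pvMarkTable s1).getD i false && (pvMarkTable s2).getD i false then
        some (Char.ofNat i) else none) with hres
  -- membership in res
  have hmemres : ∀ c, c ∈ res ↔ c ∈ s1 ∧ c ∈ s2 := by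
    intro c
    rw [hres]
    simp only [List.mem_filterMap, List.mem_range]
    constructor
    · rintro ⟨i, hi, hif⟩
      by_cases hb : (pvMarkTable s1).getD i false && (pvMarkTable s2).getD i false
      · rw [if_pos hb] at hif
        obtain ⟨rfl⟩ := Option.some_inj.mp hif
        rw [Bool.and_eq_true] at hb
        obtain ⟨hb1, hb2⟩ := hb
        obtain ⟨c1, hc1, hc1i⟩ := (pv_markTable_getD s1 i hi).mp hb1
        obtain ⟨c2, hc2, hc2i⟩ := (pv_markTable_getD s2 i hi).mp hb2
        have e1 : c1 = Char.ofNat i := by rw [← hc1i, Char.ofNat_toNat]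
        have e2 : c2 = Char.ofNat i := by rw [← hc2i, Char.ofNat_toNat]
        exact ⟨e1 ▸ hc1, e2 ▸ hc2⟩
      · rw [if_neg hb] at hif; exact absurd hif (by simp)
    · rintro ⟨h1, h2⟩
      refine ⟨c.toNat, hl1 c h1, ?_⟩
      have hb1 : (pvMarkTable s1).getD c.toNat false = true :=
        (pv_markTable_getD s1 c.toNat (hl1 c h1)).mpr ⟨c, h1, rfl⟩
      have hb2 : (pvMarkTable s2).getD c.toNat false = true :=
        (pv_markTable_getD s2 c.toNat (hl1 c h1)).mpr ⟨c, h2, rfl⟩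
      rw [if_pos (by rw [hb1, hb2]; rfl), Char.ofNat_toNat]
  -- res is strictly increasing
  have hpw : res.Pairwise (fun a b => a < b) := by
    rw [hres]
    rw [List.pairwise_filterMap]
    refine List.Pairwise.imp_of_mem ?_ List.pairwise_lt_range
    intro i j hi hj hij b hb b' hb'
    rw [List.mem_range] at hi hj
    split_ifs at hb hb' with h1 h2
    · obtain ⟨rfl⟩ := Option.some_inj.mp hb
      obtain ⟨rfl⟩ := Option.some_inj.mp hb'
      rw [Char.lt_def, UInt32.lt_iff_toBitVec_lt, BitVec.lt_def]
      show (Char.ofNat i).toNat < (Char.ofNat j).toNat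
      rw [pv_toNat_ofNat i hi, pv_toNat_ofNat j hj]
      exact hij
  -- res is a permutation of shared
  have hperm : res.Perm shared := by
    rw [List.perm_ext_iff_of_nodup (show res.Nodup from hpw.imp ne_of_lt) (pv_nodup_foldl s2 s1 [] List.nodup_nil)]
    intro c
    rw [hmemres c, ← hsh, pv_mem_foldl]
    simp
  rw [PySem.List.sorted_eq_of_perm_of_pairwise_lt shared res (fun x => x) hperm hpw]
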